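-- pv_equiv track=rewrite | github.com/sirenyige/2048 | engine.py | compute_divisor
-- ===== SOURCE A (Python) =====
-- def compute_divisor(board):
-- 	max_tile, second_max_tile, third_max_tile = 0, 0, 0
-- 	for i in range(len(board)):
-- 		for j in range(len(board[0])):
-- 			if board[i][j] > max_tile:
-- 				max_tile, second_max_tile, third_max_tile = board[i][j], max_tile, second_max_tile
-- 			elif board[i][j] > second_max_tile:
-- 				second_max_tile, third_max_tile = board[i][j], second_max_tile
-- 			elif board[i][j] > third_max_tile:
-- 				third_max_tile = board[i][j]
--
-- 	if board[0][0] != max_tile and board[0][1] != second_max_tile and board[0][2] != third_max_tile: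
-- 		return 2048
-- 	elif board[0][0] != max_tile and board[0][1] != second_max_tile:
-- 		return 1024
-- 	elif board[0][0] != max_tile and board[0][2] != third_max_tile:
-- 		return 512
-- 	elif board[0][1] != second_max_tile and board[0][2] != third_max_tile:
-- 		return 256
-- 	elif board[0][0] != max_tile:
-- 		return 512
-- 	elif board[0][1] != second_max_tile:
-- 		return 256
-- 	elif board[0][2] != third_max_tile:
-- 		return 32
-- 	return 1
-- ===== SOURCE B (Python) =====
-- def compute_divisor(board):
-- 	width = len(board[0])
-- 	cells = []
-- 	for row in board:
-- 		cells.extend(row[:width])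
-- 	top = sorted(cells + [0, 0, 0], reverse=True)
-- 	max_tile, second_max_tile, third_max_tile = top[0], top[1], top[2]
--
-- 	if board[0][0] != max_tile and board[0][1] != second_max_tile and board[0][2] != third_max_tile:
-- 		return 2048
-- 	elif board[0][0] != max_tile and board[0][1] != second_max_tile:
-- 		return 1024
-- 	elif board[0][0] != max_tile and board[0][2] != third_max_tile:
-- 		return 512
-- 	elif board[0][1] != second_max_tile and board[0][2] != third_max_tile:
-- 		return 256
-- 	elif board[0][0] != max_tile:
-- 		return 512
-- 	elif board[0][1] != second_max_tile:
-- 		return 256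
-- 	elif board[0][2] != third_max_tile:
-- 		return 32
-- 	return 1
-- ===== Notes on version B (the rewrite author's own statement) =====
-- stated objective: simpler
-- what changed: A's hand-rolled single-pass top-3 tracking with a three-branch if/elif shift chain is replaced by flattening the scanned cells, appending the three zero floors, sorting descending, and taking the first three entries; the decision tree over board[0][0..2] is unchanged.
import Mathlib
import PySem

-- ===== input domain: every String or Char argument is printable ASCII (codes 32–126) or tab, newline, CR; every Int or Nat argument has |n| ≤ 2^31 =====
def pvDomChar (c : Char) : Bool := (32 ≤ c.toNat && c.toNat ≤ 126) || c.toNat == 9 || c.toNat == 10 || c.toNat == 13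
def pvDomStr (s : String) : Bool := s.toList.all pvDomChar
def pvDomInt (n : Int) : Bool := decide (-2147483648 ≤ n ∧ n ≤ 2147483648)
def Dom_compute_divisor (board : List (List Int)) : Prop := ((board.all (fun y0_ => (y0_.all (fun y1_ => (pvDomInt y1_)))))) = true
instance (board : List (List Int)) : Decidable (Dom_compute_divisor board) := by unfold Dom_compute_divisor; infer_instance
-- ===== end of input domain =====

-- B replaces A's hand-rolled top-3 tracking loop by flattening the scanned cells, appending the
-- three zero floors, and sorting descending; the decision tree over board[0][0..2] is unchanged.

-- ===== PORT A =====
-- one iteration of A's if/elif chain updating (max_tile, second_max_tile, third_max_tile)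
def pvStep (st : Int × Int × Int) (x : Int) : Int × Int × Int :=
  if x > st.1 then (x, st.1, st.2.1)
  else if x > st.2.1 then (st.1, x, st.2.1)
  else if x > st.2.2 then (st.1, st.2.1, x)
  else st

-- A's nested loop: for i in range(len(board)): for j in range(len(board[0])): …
def pvLoopA (board : List (List Int)) : Int × Int × Int :=
  (PySem.List.pyRange 0 (board.length : Int) 1).foldl
    (fun st i =>
      (PySem.List.pyRange 0 ((PySem.List.pyGetD board 0 []).length : Int) 1).foldl
        (fun st j => pvStep st (PySem.List.pyGetD (PySem.List.pyGetD board i []) j 0)) st)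
    (0, 0, 0)

def compute_divisor (board : List (List Int)) : Int :=
  let st := pvLoopA board
  let max_tile := st.1
  let second_max_tile := st.2.1
  let third_max_tile := st.2.2
  let row0 := PySem.List.pyGetD board 0 []
  let b00 := PySem.List.pyGetD row0 0 0
  let b01 := PySem.List.pyGetD row0 1 0
  let b02 := PySem.List.pyGetD row0 2 0
  if b00 ≠ max_tile ∧ b01 ≠ second_max_tile ∧ b02 ≠ third_max_tile then 2048
  else if b00 ≠ max_tile ∧ b01 ≠ second_max_tile then 1024
  else if b00 ≠ max_tile ∧ b02 ≠ third_max_tile then 512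
  else if b01 ≠ second_max_tile ∧ b02 ≠ third_max_tile then 256
  else if b00 ≠ max_tile then 512
  else if b01 ≠ second_max_tile then 256
  else if b02 ≠ third_max_tile then 32
  else 1

-- ===== PORT B =====
-- sorted(cells + [0,0,0], reverse=True) where cells collects row[:width] for every row
def pvTopB (board : List (List Int)) : List Int :=
  PySem.List.sorted
    ((board.foldl
        (fun acc row => acc ++ PySem.List.slice row none
          (some (((PySem.List.pyGetD board 0 []).length : Int)))) [])
      ++ [0, 0, 0])
    (fun x => x) true

def compute_divisor_alt (board : List (List Int)) : Int :=
  let top := pvTopB board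
  let max_tile := PySem.List.pyGetD top 0 0
  let second_max_tile := PySem.List.pyGetD top 1 0
  let third_max_tile := PySem.List.pyGetD top 2 0
  let row0 := PySem.List.pyGetD board 0 []
  let b00 := PySem.List.pyGetD row0 0 0
  let b01 := PySem.List.pyGetD row0 1 0
  let b02 := PySem.List.pyGetD row0 2 0
  if b00 ≠ max_tile ∧ b01 ≠ second_max_tile ∧ b02 ≠ third_max_tile then 2048
  else if b00 ≠ max_tile ∧ b01 ≠ second_max_tile then 1024
  else if b00 ≠ max_tile ∧ b02 ≠ third_max_tile then 512
  else if b01 ≠ second_max_tile ∧ b02 ≠ third_max_tile then 256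
  else if b00 ≠ max_tile then 512
  else if b01 ≠ second_max_tile then 256
  else if b02 ≠ third_max_tile then 32
  else 1

-- ===== PRECONDITION & SPEC =====
-- Pre_ is exactly where the Python A returns: a nonempty board whose first row has at least 3
-- cells and whose every row has at least len(board[0]) cells; everywhere else A raises IndexError.
def Pre_compute_divisor (board : List (List Int)) : Prop :=
  board ≠ [] ∧ 3 ≤ (board.headD []).length ∧ ∀ row ∈ board, (board.headD []).length ≤ row.length
instance (board : List (List Int)) : Decidable (Pre_compute_divisor board) := by
  unfold Pre_compute_divisor; infer_instance

def pvWitness_compute_divisor : List (List Int) := [[4, 2, 1], [0, 0, 2], [8, 0, 0]]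

def Spec_compute_divisor (board : List (List Int)) (out : Int) : Prop := out = compute_divisor_alt board
instance (board : List (List Int)) (out : Int) : Decidable (Spec_compute_divisor board out) := by
  unfold Spec_compute_divisor; infer_instance

-- ===== CLAIM (what is proved, stated in full; the proofs are below) =====
def Claim_equal_compute_divisor : Prop := ∀ (board : List (List Int)), Dom_compute_divisor board → Pre_compute_divisor board → Spec_compute_divisor board (compute_divisor board)

-- ===== LEMMAS AND PROOFS =====

-- the first three entries of a list (with Python's 0 default, matching A's zero floors)
def pvTop3 (l : List Int) : Int × Int × Int :=
  (PySem.List.pyGetD l 0 0, PySem.List.pyGetD l 1 0, PySem.List.pyGetD l 2 0)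

-- insertion into a descending list, new element AFTER equal ones (x goes before the first y < x)
def pvIns (x : Int) : List Int → List Int
  | [] => [x]
  | y :: ys => if x > y then x :: y :: ys else y :: pvIns x ys

lemma pvIns_perm (x : Int) (l : List Int) : (pvIns x l).Perm (x :: l) := by
  induction l with
  | nil => simp [pvIns]
  | cons y ys ih =>
    simp only [pvIns]
    split
    · exact List.Perm.refl _
    · exact (List.Perm.cons y ih).trans (List.Perm.swap x y ys)

lemma pvIns_pairwise (x : Int) (l : List Int) (h : l.Pairwise (· ≥ ·)) :
    (pvIns x l).Pairwise (· ≥ ·) := by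
  induction l with
  | nil => simp [pvIns]
  | cons y ys ih =>
    rcases List.pairwise_cons.mp h with ⟨hy, hys⟩
    simp only [pvIns]
    split
    · rename_i hxy
      refine List.pairwise_cons.mpr ⟨?_, h⟩
      intro z hz
      rcases List.mem_cons.mp hz with hz | hz
      · omega
      · have := hy z hz; omega
    · rename_i hxy
      refine List.pairwise_cons.mpr ⟨?_, ih hys⟩
      intro z hz
      rcases List.mem_cons.mp ((pvIns_perm x ys).mem_iff.mp hz) with hz | hz
      · omega
      · exact hy z hz

lemma pvIns_length (x : Int) (l : List Int) : (pvIns x l).length = l.length + 1 := by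
  induction l with
  | nil => simp [pvIns]
  | cons y ys ih => simp only [pvIns]; split <;> simp [ih]

lemma pvGetD1 {α : Type} (d a b : α) (r : List α) : PySem.List.pyGetD (a :: b :: r) 1 d = b := by
  simp [PySem.List.pyGetD, PySem.List.pyGet?, PySem.List.pyIdx?, show (0:Int) ≤ (r.length:Int) by omega]

lemma pvGetD2 {α : Type} (d a b c : α) (r : List α) : PySem.List.pyGetD (a :: b :: c :: r) 2 d = c := by
  simp [PySem.List.pyGetD, PySem.List.pyGet?, PySem.List.pyIdx?, show (2:Int) ≤ (r.length:Int) + 1 + 1 by omega]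

lemma pvTop3_pvIns (x : Int) (l : List Int) (hp : l.Pairwise (· ≥ ·)) (hl : 3 ≤ l.length) :
    pvTop3 (pvIns x l) = pvStep (pvTop3 l) x := by
  rcases l with _ | ⟨a, l⟩
  · simp at hl
  rcases l with _ | ⟨b, l⟩
  · simp at hl
  rcases l with _ | ⟨c, rest⟩
  · simp at hl
  rcases List.pairwise_cons.mp hp with ⟨ha, hp2⟩
  rcases List.pairwise_cons.mp hp2 with ⟨hb, _⟩
  have hab : a ≥ b := ha b (by simp)
  have hbc : b ≥ c := hb c (by simp)
  by_cases h1 : x > a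
  · simp [pvIns, h1, pvTop3, pvStep, pvGetD1, pvGetD2]
  · by_cases h2 : x > b
    · simp [pvIns, h1, h2, pvTop3, pvStep, pvGetD1, pvGetD2]
    · by_cases h3 : x > c
      · simp [pvIns, h1, h2, h3, pvTop3, pvStep, pvGetD1, pvGetD2]
      · simp [pvIns, h1, h2, h3, pvTop3, pvStep, pvGetD1, pvGetD2]

lemma fold_pvTop3 (l : List Int) :
    ∀ (acc : List Int), acc.Pairwise (· ≥ ·) → 3 ≤ acc.length →
      l.foldl pvStep (pvTop3 acc) = pvTop3 (l.foldl (fun acc x => pvIns x acc) acc) := by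
  induction l with
  | nil => intro acc _ _; rfl
  | cons x xs ih =>
    intro acc hp hl
    have h1 : pvStep (pvTop3 acc) x = pvTop3 (pvIns x acc) := (pvTop3_pvIns x acc hp hl).symm
    simp only [List.foldl_cons, h1]
    exact ih (pvIns x acc) (pvIns_pairwise x acc hp) (by rw [pvIns_length]; omega)

lemma pvInsFold_perm (l : List Int) : ∀ acc : List Int,
    (l.foldl (fun acc x => pvIns x acc) acc).Perm (l ++ acc) := by
  induction l with
  | nil => intro acc; simp
  | cons x xs ih =>
    intro acc
    simp only [List.foldl_cons, List.cons_append]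
    exact (ih _).trans ((List.Perm.append_left xs (pvIns_perm x acc)).trans List.perm_middle)

lemma pvInsFold_pairwise (l : List Int) : ∀ acc : List Int, acc.Pairwise (· ≥ ·) →
    (l.foldl (fun acc x => pvIns x acc) acc).Pairwise (· ≥ ·) := by
  induction l with
  | nil => intro acc h; exact h
  | cons x xs ih => intro acc h; exact ih _ (pvIns_pairwise x acc h)

-- sorted(cells ++ [0,0,0], reverse=True) equals the insertion fold
lemma sorted_eq_insFold (cells : List Int) :
    PySem.List.sorted (cells ++ [0, 0, 0]) (fun x => x) true
      = cells.foldl (fun acc x => pvIns x acc) [0, 0, 0] := by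
  refine List.Perm.eq_of_pairwise (le := (· ≥ ·)) (fun a b _ _ u v => le_antisymm v u) ?_ ?_ ?_
  · exact PySem.List.sorted_pairwise_rev (cells ++ [0, 0, 0]) (fun x => x)
  · exact pvInsFold_pairwise cells [0, 0, 0] (by decide)
  · exact (PySem.List.sorted_perm (cells ++ [0, 0, 0]) (fun x => x) true).trans
      (pvInsFold_perm cells [0, 0, 0]).symm

-- A's tracking fold equals the first three of the descending sort
lemma core (cells : List Int) :
    cells.foldl pvStep (0, 0, 0)
      = pvTop3 (PySem.List.sorted (cells ++ [0, 0, 0]) (fun x => x) true) := by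
  rw [sorted_eq_insFold]
  have h0 : pvTop3 [0, 0, 0] = ((0 : Int), (0 : Int), (0 : Int)) := by decide
  rw [← h0, fold_pvTop3 cells [0, 0, 0] (by decide) (by decide)]

-- one row of A's inner loop reads exactly row[:width]
lemma row_fold (w : Nat) (r : List Int) (hw : w ≤ r.length) (st : Int × Int × Int) :
    (PySem.List.pyRange 0 (w : Int) 1).foldl
        (fun st j => pvStep st (PySem.List.pyGetD r j 0)) st
      = (r.take w).foldl pvStep st := by
  have hcongr : ∀ (acc : Int × Int × Int), ∀ j ∈ PySem.List.pyRange 0 (w : Int) 1,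
      pvStep acc (PySem.List.pyGetD r j 0) = pvStep acc (PySem.List.pyGetD (r.take w) j 0) := by
    intro acc j hj
    have hj' := PySem.List.mem_pyRange_one.mp hj
    congr 1
    rw [PySem.List.pyGetD_eq_getElem r 0 hj'.1 (by omega),
        PySem.List.pyGetD_eq_getElem (r.take w) 0 hj'.1 (by simp; omega)]
    simp [List.getElem_take]
  rw [PySem.List.foldl_congr_mem _ _ _ _ hcongr]
  have hlen : ((w : Int)) = ((r.take w).length : Int) := by simp [List.length_take]; omega
  rw [hlen]
  exact PySem.List.foldl_pyRange_zero_pyGetD' (r.take w) 0 pvStep st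

lemma rows_fold (w : Nat) (rows : List (List Int)) (h : ∀ r ∈ rows, w ≤ r.length)
    (st : Int × Int × Int) :
    rows.foldl (fun st row =>
        (PySem.List.pyRange 0 (w : Int) 1).foldl
          (fun st j => pvStep st (PySem.List.pyGetD row j 0)) st) st
      = (rows.flatMap (fun r => r.take w)).foldl pvStep st := by
  induction rows generalizing st with
  | nil => rfl
  | cons r rows ih =>
    simp only [List.foldl_cons, List.flatMap_cons, List.foldl_append]
    rw [row_fold w r (h r (by simp)) st]
    exact ih (fun r hr => h r (by simp [hr])) _

lemma loopA_eq (board : List (List Int))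
    (h : ∀ r ∈ board, (PySem.List.pyGetD board 0 []).length ≤ r.length) :
    pvLoopA board
      = (board.flatMap (fun r => r.take (PySem.List.pyGetD board 0 []).length)).foldl
          pvStep (0, 0, 0) := by
  unfold pvLoopA
  rw [PySem.List.foldl_pyRange_zero_pyGetD' board []
      (fun st row => (PySem.List.pyRange 0 ((PySem.List.pyGetD board 0 []).length : Int) 1).foldl
        (fun st j => pvStep st (PySem.List.pyGetD row j 0)) st) (0, 0, 0)]
  exact rows_fold _ board h _

lemma cellsB (w : Nat) (rows : List (List Int)) (acc : List Int) :
    rows.foldl (fun acc row => acc ++ PySem.List.slice row none (some (w : Int))) acc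
      = acc ++ rows.flatMap (fun r => r.take w) := by
  simp only [PySem.List.slice_to_natCast]
  induction rows generalizing acc with
  | nil => simp
  | cons r rows ih =>
    simp only [List.foldl_cons, List.flatMap_cons]
    rw [ih]; simp

-- ===== VERDICT (by name: the statement is the Claim_ definition above) =====
theorem compute_divisor_spec : Claim_equal_compute_divisor := by
  unfold Claim_equal_compute_divisor
  intro board _ hpre
  obtain ⟨hne, h3, hrows⟩ := hpre
  have hhead : PySem.List.pyGetD board 0 [] = board.headD [] := by
    rcases board with _ | ⟨r, rows⟩
    · exact absurd rfl hne
    · simp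
  have hA : pvLoopA board = pvTop3 (pvTopB board) := by
    rw [loopA_eq board (by rw [hhead]; exact hrows)]
    unfold pvTopB
    rw [cellsB _ board []]
    simp only [List.nil_append]
    exact core _
  unfold Spec_compute_divisor
  show compute_divisor board = compute_divisor_alt board
  simp only [compute_divisor, compute_divisor_alt, hA, pvTop3]
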